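-- pv_equiv track=rewrite | github.com/skr006/Adobe-Hackathon-1B | app.py | hierarchical_split
-- ===== SOURCE A (Python) =====
-- def hierarchical_split(text):
--     lines = text.split('\n')
--     chunks = []
--     current_chunk = []
--     for line in lines:
--         if line.strip() == "":
--             continue
--         if line.strip().endswith(":") or line.strip().istitle():
--             if current_chunk:
--                 chunks.append("\n".join(current_chunk))
--                 current_chunk = []
--         current_chunk.append(line)
--     if current_chunk:
--         chunks.append("\n".join(current_chunk))
--     return chunks
-- ===== SOURCE B (Python) =====
-- def _is_heading(line):
--     t = line.strip()
--     return t.endswith(':') or t.istitle()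
--
-- def hierarchical_split(text):
--     lines = [l for l in text.split('\n') if l.strip()]
--     chunks = []
--     i = 0
--     while i < len(lines):
--         j = i + 1
--         while j < len(lines) and not _is_heading(lines[j]):
--             j += 1
--         chunks.append('\n'.join(lines[i:j]))
--         i = j
--     return chunks
-- ===== Notes on version B (the rewrite author's own statement) =====
-- stated objective: alternative
-- what changed: A's single accumulate-and-flush loop with mutable chunk state is replaced by first filtering out blank lines and then recursively slicing the filtered list into segments at heading lines (head line plus following non-heading lines).
import Mathlib
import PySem

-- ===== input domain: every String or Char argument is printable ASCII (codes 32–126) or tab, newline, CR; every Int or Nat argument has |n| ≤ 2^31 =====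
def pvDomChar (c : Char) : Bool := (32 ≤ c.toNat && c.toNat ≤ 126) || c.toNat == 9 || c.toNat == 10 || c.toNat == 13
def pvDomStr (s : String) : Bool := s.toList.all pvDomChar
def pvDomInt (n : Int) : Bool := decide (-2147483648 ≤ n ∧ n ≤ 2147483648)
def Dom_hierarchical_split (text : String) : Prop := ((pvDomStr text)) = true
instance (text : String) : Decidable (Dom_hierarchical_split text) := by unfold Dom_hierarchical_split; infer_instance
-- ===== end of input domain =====

-- B replaces A's accumulate-and-flush loop by "filter the blank lines, then recursively slice the
-- list at heading lines" (same return value; objective: alternative decomposition, no speed claim).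

-- shared helper: ASCII uppercase / lowercase (exact for the printable-ASCII domain)
def pvIsUpper (c : Char) : Bool := 65 ≤ c.toNat && c.toNat ≤ 90
def pvIsLower (c : Char) : Bool := 97 ≤ c.toNat && c.toNat ≤ 122

-- str.istitle() for ASCII text, CPython's loop (early return ported as recursion)
def pvIstitleAux : List Char → Bool → Bool → Bool
  | [], _, cased => cased
  | c :: cs, prev, cased =>
    if pvIsUpper c then (if prev then false else pvIstitleAux cs true true)
    else if pvIsLower c then (if !prev then false else pvIstitleAux cs true true)
    else pvIstitleAux cs false cased

def pvIstitle (cs : List Char) : Bool := pvIstitleAux cs false false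

-- shared helper: line.strip().endswith(":") or line.strip().istitle()
def pvIsHeading (l : List Char) : Bool :=
  let t := PySem.Chars.strip l
  PySem.Chars.endswith t [':'] || pvIstitle t

def pvJoin (cur : List (List Char)) : String := String.ofList (PySem.Chars.join ['\n'] cur)

-- ===== PORT A =====
-- A's loop body: skip blank lines; on a heading flush the nonempty current chunk; append the line
def pvStepA (st : List String × List (List Char)) (line : List Char) :
    List String × List (List Char) :=
  if PySem.Chars.strip line = [] then st
  else
    let st2 := if pvIsHeading line then
        (if st.2 = [] then st else (st.1 ++ [pvJoin st.2], [])) else st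
    (st2.1, st2.2 ++ [line])

def hierarchical_split (text : String) : List String :=
  let lines := PySem.Chars.splitOn text.toList ['\n']
  let st := lines.foldl pvStepA ([], [])
  if st.2 = [] then st.1 else st.1 ++ [pvJoin st.2]

-- ===== PORT B =====
-- B: on the blank-filtered lines, each chunk is the head line plus the following non-heading lines
def pvChunks : List (List Char) → List String
  | [] => []
  | l :: rest =>
    pvJoin (l :: rest.takeWhile (fun x => !pvIsHeading x))
      :: pvChunks (rest.dropWhile (fun x => !pvIsHeading x))
termination_by ls => ls.length
decreasing_by
  simpa [Nat.lt_succ_iff] using (List.dropWhile_sublist (l := rest) (p := fun x => !pvIsHeading x)).length_le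

def hierarchical_split_alt (text : String) : List String :=
  pvChunks ((PySem.Chars.splitOn text.toList ['\n']).filter
    (fun l => !decide (PySem.Chars.strip l = [])))

-- ===== PRECONDITION & SPEC =====
def Spec_hierarchical_split (text : String) (out : List String) : Prop := out = hierarchical_split_alt text
instance (text : String) (out : List String) : Decidable (Spec_hierarchical_split text out) := by unfold Spec_hierarchical_split; infer_instance

-- ===== CLAIM (what is proved, stated in full; the proofs are below) =====
def Claim_equal_hierarchical_split : Prop := ∀ (text : String), Dom_hierarchical_split text → Spec_hierarchical_split text (hierarchical_split text)

-- ===== LEMMAS AND PROOFS =====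

theorem pvChunks_cons (l : List Char) (rest : List (List Char)) :
    pvChunks (l :: rest) = pvJoin (l :: rest.takeWhile (fun x => !pvIsHeading x))
      :: pvChunks (rest.dropWhile (fun x => !pvIsHeading x)) := by
  rw [pvChunks.eq_def]

def pvFinal (st : List String × List (List Char)) : List String :=
  if st.2 = [] then st.1 else st.1 ++ [pvJoin st.2]

-- blank lines leave A's state unchanged: folding over the filtered list is the same
theorem foldl_stepA_filter (ls : List (List Char)) (st : List String × List (List Char)) :
    ls.foldl pvStepA st =
      (ls.filter (fun l => !decide (PySem.Chars.strip l = []))).foldl pvStepA st := by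
  induction ls generalizing st with
  | nil => rfl
  | cons x xs ih =>
    by_cases hx : PySem.Chars.strip x = []
    · simp [hx, List.foldl_cons, pvStepA, ih]
    · simp [hx, List.foldl_cons, ih]

-- the invariant of A's loop on blank-free lines, phrased against B's slicing
theorem stepA_invariant (ls : List (List Char)) (chunks : List String)
    (cur : List (List Char)) (hcur : cur ≠ [])
    (hnb : ∀ l ∈ ls, PySem.Chars.strip l ≠ []) :
    pvFinal (ls.foldl pvStepA (chunks, cur)) =
      chunks ++ (pvJoin (cur ++ ls.takeWhile (fun x => !pvIsHeading x))
        :: pvChunks (ls.dropWhile (fun x => !pvIsHeading x))) := by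
  induction ls generalizing chunks cur with
  | nil => simp [pvFinal, hcur, pvChunks]
  | cons x xs ih =>
    have hnbx : PySem.Chars.strip x ≠ [] := hnb x (by simp)
    have hnb' : ∀ l ∈ xs, PySem.Chars.strip l ≠ [] := fun l hl => hnb l (by simp [hl])
    by_cases hh : pvIsHeading x
    · have hstep : pvStepA (chunks, cur) x = (chunks ++ [pvJoin cur], [x]) := by
        simp [pvStepA, hnbx, hh, hcur]
      rw [List.foldl_cons, hstep, ih _ _ (by simp) hnb']
      rw [List.takeWhile_cons, List.dropWhile_cons]
      simp [hh, pvChunks_cons]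
    · have hstep : pvStepA (chunks, cur) x = (chunks, cur ++ [x]) := by
        simp [pvStepA, hnbx, hh]
      rw [List.foldl_cons, hstep, ih _ _ (by simp) hnb']
      rw [List.takeWhile_cons, List.dropWhile_cons]
      simp [hh]

-- ===== VERDICT (by name: the statement is the Claim_ definition above) =====
theorem hierarchical_split_spec : Claim_equal_hierarchical_split := by
  intro text _
  unfold Spec_hierarchical_split hierarchical_split hierarchical_split_alt
  show pvFinal ((PySem.Chars.splitOn text.toList ['\n']).foldl pvStepA ([], [])) =
    pvChunks ((PySem.Chars.splitOn text.toList ['\n']).filter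
      (fun l => !decide (PySem.Chars.strip l = [])))
  rw [foldl_stepA_filter]
  rcases hc : (PySem.Chars.splitOn text.toList ['\n']).filter
      (fun l => !decide (PySem.Chars.strip l = [])) with _ | ⟨l, rest⟩
  · simp [pvFinal, pvChunks]
  · have hall : ∀ x ∈ l :: rest, PySem.Chars.strip x ≠ [] := by
      intro x hx
      have : x ∈ (PySem.Chars.splitOn text.toList ['\n']).filter
          (fun l => !decide (PySem.Chars.strip l = [])) := hc ▸ hx
      simpa using (List.mem_filter.mp this).2
    have hstep : pvStepA ([], []) l = ([], [l]) := by
      simp [pvStepA, hall l (by simp)]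
    rw [List.foldl_cons, hstep,
      stepA_invariant rest [] [l] (by simp) (fun x hx => hall x (by simp [hx]))]
    rw [pvChunks_cons]
    simp
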